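-- pv_equiv track=rewrite | github.com/paultoster/toolsHome | tools_tb/python3/hfkt.py | get_index_no_quot
-- ===== SOURCE A (Python) =====
-- def get_index_no_quot(text,quot0,quot1):
--     """
--     Gibt Indexpaare (Tuples) in dem der Text nicht gequotet ist z.B.
--
--     text  = "abc {nest} efg  {plab}"
--     #        0123456789012345678901
--     quot0 = "{"
--     quot1 = "}"
--
--     a = get_index_quot(text,quot0,quot1)
--
--     a ergibt [(0,4),(10,16)]
--     """
--     liste = []
--
--     i0  = 0
--     i1  = len(text)
-- #   print "i1 = %i" % i1
--     lq0 = len(quot0)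
--     lq1 = len(quot1)
--
--     istart = 0
--
--     while istart < i1:
--
--         iend = text.find(quot0,istart,i1)
-- #       print "iend = %i" % iend
--         if iend == -1:
--             iend = i1
--
--         tup = (istart,iend-1)
--         if( istart != iend ):
--             liste.append(tup)
--
--         i0 = text.find(quot1,iend+lq0,i1)
--
--         if i0 == -1:
--             istart = i1
--         else:
--             istart = i0+lq1
--
--
--     return liste
-- ===== SOURCE B (Python) =====
-- def get_index_no_quot(text, quot0, quot1):
--     # Two-pass rewrite: first collect the quoted spans (open, resume) pairs,
--     # then emit the complementary non-quoted ranges.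
--     n = len(text)
--     lq0 = len(quot0)
--     lq1 = len(quot1)
--
--     spans = []
--     pos = 0
--     while pos < n:
--         o = text.find(quot0, pos, n)
--         if o == -1:
--             break
--         c = text.find(quot1, o + lq0, n)
--         if c == -1:
--             # unclosed quote: it swallows the rest of the text
--             spans.append((o, n))
--             break
--         spans.append((o, c + lq1))
--         pos = c + lq1
--
--     res = []
--     prev = 0
--     for (o, r) in spans:
--         if prev < o:
--             res.append((prev, o - 1))
--         prev = r
--     if prev < n:
--         res.append((prev, n - 1))
--     return res
-- ===== Notes on version B (the rewrite author's own statement) =====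
-- stated objective: alternative
-- what changed: A's single while-loop that interleaves gap emission with delimiter scanning is replaced by two passes: first collect the quoted spans as (open, resume) pairs, then emit the complementary non-quoted ranges from the span boundaries.
import Mathlib
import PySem

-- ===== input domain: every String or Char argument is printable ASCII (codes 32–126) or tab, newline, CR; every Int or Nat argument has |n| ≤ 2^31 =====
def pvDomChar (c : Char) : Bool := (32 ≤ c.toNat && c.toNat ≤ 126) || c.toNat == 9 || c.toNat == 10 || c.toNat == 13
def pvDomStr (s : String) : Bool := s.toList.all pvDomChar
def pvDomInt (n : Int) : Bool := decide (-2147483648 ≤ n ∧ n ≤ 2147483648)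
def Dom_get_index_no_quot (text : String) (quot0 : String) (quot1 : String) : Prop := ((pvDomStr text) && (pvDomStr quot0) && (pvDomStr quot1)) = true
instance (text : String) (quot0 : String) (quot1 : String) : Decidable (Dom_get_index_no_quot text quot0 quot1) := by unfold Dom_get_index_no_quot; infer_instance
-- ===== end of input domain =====

-- B replaces A's single gap-emitting loop by two passes — collect the quoted
-- spans, then emit the complementary ranges (objective: alternative decomposition).

-- ===== PORT A =====
def pvLoopA (text quot0 quot1 : String) (i1 lq0 lq1 : Int) :
    Nat → Int → List (Int × Int) → List (Int × Int)
  | 0, _, liste => liste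
  | fuel+1, istart, liste =>
    if istart < i1 then
      let iend0 := PySem.Str.findFrom text quot0 istart (some i1)
      let iend := if iend0 = -1 then i1 else iend0
      let liste' := if istart ≠ iend then liste ++ [(istart, iend - 1)] else liste
      let i0 := PySem.Str.findFrom text quot1 (iend + lq0) (some i1)
      let istart' := if i0 = -1 then i1 else i0 + lq1
      pvLoopA text quot0 quot1 i1 lq0 lq1 fuel istart' liste'
    else liste


def get_index_no_quot (text : String) (quot0 : String) (quot1 : String) : List (Int × Int) :=
  pvLoopA text quot0 quot1 (PySem.Str.len text) (PySem.Str.len quot0) (PySem.Str.len quot1)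
    (text.toList.length + 1) 0 []

-- ===== PORT B =====
def pvSpansB (text quot0 quot1 : String) (n lq0 lq1 : Int) :
    Nat → Int → List (Int × Int)
  | 0, _ => []
  | fuel+1, pos =>
    if pos < n then
      let o := PySem.Str.findFrom text quot0 pos (some n)
      if o = -1 then []
      else
        let c := PySem.Str.findFrom text quot1 (o + lq0) (some n)
        if c = -1 then [(o, n)]
        else (o, c + lq1) :: pvSpansB text quot0 quot1 n lq0 lq1 fuel (c + lq1)
    else []

def pvGapsB (n : Int) : List (Int × Int) → Int → List (Int × Int)
  | [], prev => if prev < n then [(prev, n - 1)] else []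
  | (o, r) :: rest, prev => (if prev < o then [(prev, o - 1)] else []) ++ pvGapsB n rest r


def get_index_no_quot_alt (text : String) (quot0 : String) (quot1 : String) : List (Int × Int) :=
  pvGapsB (PySem.Str.len text)
    (pvSpansB text quot0 quot1 (PySem.Str.len text) (PySem.Str.len quot0) (PySem.Str.len quot1)
      (text.toList.length + 1) 0)
    0

-- ===== PRECONDITION & SPEC =====
-- Pre_ excludes only quot0 = "" ∧ quot1 = "" with nonempty text: there the
-- Python A never returns (the loop index istart never advances).
def Pre_get_index_no_quot (text : String) (quot0 : String) (quot1 : String) : Prop :=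
  ¬(quot0 = "" ∧ quot1 = "" ∧ text ≠ "")
instance (text : String) (quot0 : String) (quot1 : String) : Decidable (Pre_get_index_no_quot text quot0 quot1) := by unfold Pre_get_index_no_quot; infer_instance

def pvWitness_get_index_no_quot : String × String × String := ("a{b}c{d", "{", "}")

def Spec_get_index_no_quot (text : String) (quot0 : String) (quot1 : String) (out : List (Int × Int)) : Prop := out = get_index_no_quot_alt text quot0 quot1
instance (text : String) (quot0 : String) (quot1 : String) (out : List (Int × Int)) : Decidable (Spec_get_index_no_quot text quot0 quot1 out) := by unfold Spec_get_index_no_quot; infer_instance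

-- ===== CLAIM (what is proved, stated in full; the proofs are below) =====
def Claim_equal_get_index_no_quot : Prop := ∀ (text : String) (quot0 : String) (quot1 : String), Dom_get_index_no_quot text quot0 quot1 → Pre_get_index_no_quot text quot0 quot1 → Spec_get_index_no_quot text quot0 quot1 (get_index_no_quot text quot0 quot1)

-- ===== LEMMAS AND PROOFS =====

-- === Chars-level facts about find(sub, k, len) ===
theorem pvFF_past (s sub : List Char) (k : Int) (h : (s.length : Int) < k) :
    PySem.Chars.findFrom s sub k (some (s.length : Int)) = -1 := by
  unfold PySem.Chars.findFrom
  simp only []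
  split_ifs with h1 h2 <;> first | rfl | omega

theorem pvFF_nil (s : List Char) (k : Int) (h0 : 0 ≤ k) (h1 : k ≤ (s.length : Int)) :
    PySem.Chars.findFrom s [] k (some (s.length : Int)) = k := by
  unfold PySem.Chars.findFrom
  simp [PySem.Chars.find_nil]
  omega

theorem pvFF_ge (s sub : List Char) (k : Int) (h0 : 0 ≤ k)
    (h : PySem.Chars.findFrom s sub k (some (s.length : Int)) ≠ -1) :
    k ≤ PySem.Chars.findFrom s sub k (some (s.length : Int)) := by
  unfold PySem.Chars.findFrom at *
  have := PySem.Chars.neg_one_le_find (List.drop k.toNat (List.take (s.length:Int).toNat s)) sub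
  simp only [] at *
  split_ifs at * <;> omega

-- === the same facts at String level, as the ports use them ===
theorem pvLen_nonneg (s : String) : 0 ≤ PySem.Str.len s := by
  rw [PySem.Str.len_eq]; positivity

theorem pvLen_pos (s : String) (h : s ≠ "") : 1 ≤ PySem.Str.len s := by
  rw [PySem.Str.len_eq]
  have : s.toList ≠ [] := by
    intro hl; apply h; cases s; simp_all
  have := List.length_pos_of_ne_nil this
  omega

theorem pvLen_empty : PySem.Str.len "" = 0 := by decide

theorem pvFFS_past (s sub : String) (k : Int) (h : PySem.Str.len s < k) :
    PySem.Str.findFrom s sub k (some (PySem.Str.len s)) = -1 := by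
  rw [PySem.Str.len_eq] at h ⊢
  rw [PySem.Str.findFrom_eq]
  exact pvFF_past _ _ _ h

theorem pvFFS_nil (s : String) (k : Int) (h0 : 0 ≤ k) (h1 : k ≤ PySem.Str.len s) :
    PySem.Str.findFrom s "" k (some (PySem.Str.len s)) = k := by
  rw [PySem.Str.len_eq] at h1 ⊢
  rw [PySem.Str.findFrom_eq]
  exact pvFF_nil _ _ h0 h1

theorem pvFFS_ge (s sub : String) (k : Int) (h0 : 0 ≤ k)
    (h : PySem.Str.findFrom s sub k (some (PySem.Str.len s)) ≠ -1) :
    k ≤ PySem.Str.findFrom s sub k (some (PySem.Str.len s)) := by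
  rw [PySem.Str.len_eq] at h ⊢
  rw [PySem.Str.findFrom_eq] at h ⊢
  exact pvFF_ge _ _ _ h0 h

theorem pvLoopA_stop (text quot0 quot1 : String) (i1 lq0 lq1 : Int) (fuel : Nat)
    (pos : Int) (liste : List (Int × Int)) (h : ¬ pos < i1) :
    pvLoopA text quot0 quot1 i1 lq0 lq1 fuel pos liste = liste := by
  cases fuel <;> simp [pvLoopA, h]

theorem pvMain (text quot0 quot1 : String)
    (hq : quot0 = "" → quot1 = "" → text = "") :
    ∀ (fuel : Nat) (pos : Int) (liste : List (Int × Int)), 0 ≤ pos →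
      (PySem.Str.len text - pos ≤ fuel) →
      pvLoopA text quot0 quot1 (PySem.Str.len text) (PySem.Str.len quot0) (PySem.Str.len quot1) fuel pos liste
        = liste ++ pvGapsB (PySem.Str.len text)
            (pvSpansB text quot0 quot1 (PySem.Str.len text) (PySem.Str.len quot0) (PySem.Str.len quot1) fuel pos) pos := by
  intro fuel
  induction fuel with
  | zero =>
    intro pos liste h0 hf
    have hge : ¬ pos < PySem.Str.len text := by push_cast at hf; omega
    simp only [pvLoopA, pvSpansB, pvGapsB]
    rw [if_neg hge]
    simp
  | succ f ih =>
    intro pos liste h0 hf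
    push_cast at hf
    by_cases hlt : pos < PySem.Str.len text
    · by_cases ho : PySem.Str.findFrom text quot0 pos (some (PySem.Str.len text)) = -1
      · -- no further opening delimiter: final gap, then stop
        have hq0 : quot0 ≠ "" := by
          intro hq0
          rw [hq0, pvFFS_nil text pos h0 (by omega)] at ho
          omega
        have hlq0 : 1 ≤ PySem.Str.len quot0 := pvLen_pos _ hq0
        have hi0 : PySem.Str.findFrom text quot1
            (PySem.Str.len text + PySem.Str.len quot0) (some (PySem.Str.len text)) = -1 :=
          pvFFS_past _ _ _ (by omega)
        have hne : pos ≠ PySem.Str.len text := by omega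
        simp only [pvLoopA, pvSpansB, if_pos hlt, if_pos ho, hne, ne_eq,
          not_false_iff, if_true, hi0]
        rw [pvLoopA_stop _ _ _ _ _ _ _ _ _ (lt_irrefl _), pvGapsB, if_pos hlt]
      · -- opening delimiter found
        have hge : pos ≤ PySem.Str.findFrom text quot0 pos (some (PySem.Str.len text)) :=
          pvFFS_ge _ _ _ h0 ho
        by_cases hc : PySem.Str.findFrom text quot1
            (PySem.Str.findFrom text quot0 pos (some (PySem.Str.len text)) + PySem.Str.len quot0)
            (some (PySem.Str.len text)) = -1
        · -- unclosed quote: emit the gap before it (if any) and stop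
          simp only [pvLoopA, pvSpansB, if_pos hlt, if_neg ho, if_pos hc, ne_eq, ite_not]
          rw [pvLoopA_stop _ _ _ _ _ _ _ _ _ (lt_irrefl _)]
          simp only [pvGapsB, if_neg (lt_irrefl (PySem.Str.len text)), List.append_nil]
          by_cases hpo : pos < PySem.Str.findFrom text quot0 pos (some (PySem.Str.len text))
          · rw [if_neg (by omega), if_pos hpo]
          · rw [if_pos (by omega), if_neg hpo]
            simp
        · -- closed quote: recurse past the closing delimiter
          have hlq0nn : 0 ≤ PySem.Str.len quot0 := pvLen_nonneg _
          have hlq1nn : 0 ≤ PySem.Str.len quot1 := pvLen_nonneg _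
          have hcge := pvFFS_ge text quot1
            (PySem.Str.findFrom text quot0 pos (some (PySem.Str.len text)) + PySem.Str.len quot0)
            (by omega) hc
          have hprog : pos + 1 ≤ PySem.Str.findFrom text quot1
              (PySem.Str.findFrom text quot0 pos (some (PySem.Str.len text)) + PySem.Str.len quot0)
              (some (PySem.Str.len text)) + PySem.Str.len quot1 := by
            by_cases h0q : quot0 = ""
            · have h1q : quot1 ≠ "" := by
                intro h1q
                have := hq h0q h1q
                rw [this, pvLen_empty] at hlt
                omega
              have := pvLen_pos _ h1q
              omega
            · have := pvLen_pos _ h0q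
              omega
          have hrec := ih (PySem.Str.findFrom text quot1
              (PySem.Str.findFrom text quot0 pos (some (PySem.Str.len text)) + PySem.Str.len quot0)
              (some (PySem.Str.len text)) + PySem.Str.len quot1)
            (if pos = PySem.Str.findFrom text quot0 pos (some (PySem.Str.len text)) then liste
             else liste ++ [(pos, PySem.Str.findFrom text quot0 pos (some (PySem.Str.len text)) - 1)])
            (by omega) (by omega)
          simp only [pvLoopA, pvSpansB, if_pos hlt, if_neg ho, if_neg hc, ne_eq, ite_not]
          rw [hrec, pvGapsB]
          by_cases hpo : pos < PySem.Str.findFrom text quot0 pos (some (PySem.Str.len text))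
          · rw [if_neg (by omega), if_pos hpo, List.append_assoc]
          · rw [if_pos (by omega), if_neg hpo]
            simp
    · rw [pvLoopA_stop _ _ _ _ _ _ _ _ _ hlt]
      simp only [pvSpansB]
      rw [if_neg hlt, pvGapsB, if_neg hlt]
      simp

-- ===== VERDICT (by name: the statement is the Claim_ definition above) =====
theorem get_index_no_quot_spec : Claim_equal_get_index_no_quot := by
  intro text quot0 quot1 _ hpre
  unfold Spec_get_index_no_quot get_index_no_quot get_index_no_quot_alt
  refine pvMain text quot0 quot1 ?_ _ 0 [] le_rfl ?_
  · intro h0 h1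
    by_contra ht
    exact hpre ⟨h0, h1, ht⟩
  · rw [PySem.Str.len_eq]
    push_cast
    omega
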